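-- pv_equiv track=rewrite | github.com/earthastronaut/python_morsels | cubes/cubes.py | stackpair
-- ===== SOURCE A (Python) =====
-- def stackpair(blocks):
--     for i in range(0, len(blocks)):
--         j = len(blocks) - i - 1
--         if i == j:
--             cube = blocks[i]
--             yield i, i, cube, cube
--         elif j > i:
--             left = blocks[i]
--             right = blocks[j]
--             minlength = min(left, right)
--             maxlength = max(left, right)
--             yield i, j, minlength, maxlength
--         else:
--             break
-- ===== SOURCE B (Python) =====
-- def stackpair(blocks):
--     yield from _peel(blocks, 0)
--
--
-- def _peel(sub, i):
--     if not sub: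
--         return
--     if len(sub) == 1:
--         yield (i, i, sub[0], sub[0])
--         return
--     first, last = sub[0], sub[-1]
--     yield (i, i + len(sub) - 1, min(first, last), max(first, last))
--     yield from _peel(sub[1:-1], i + 1)
-- ===== Notes on version B (the rewrite author's own statement) =====
-- stated objective: alternative
-- what changed: Replaces A's index loop over range(len(blocks)) with break and three branches by a recursive peel that yields the pair of the first and last element and recurses on the middle slice sub[1:-1]; element access is positional (sub[0], sub[-1]), not index arithmetic into the original list.
import Mathlib
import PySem

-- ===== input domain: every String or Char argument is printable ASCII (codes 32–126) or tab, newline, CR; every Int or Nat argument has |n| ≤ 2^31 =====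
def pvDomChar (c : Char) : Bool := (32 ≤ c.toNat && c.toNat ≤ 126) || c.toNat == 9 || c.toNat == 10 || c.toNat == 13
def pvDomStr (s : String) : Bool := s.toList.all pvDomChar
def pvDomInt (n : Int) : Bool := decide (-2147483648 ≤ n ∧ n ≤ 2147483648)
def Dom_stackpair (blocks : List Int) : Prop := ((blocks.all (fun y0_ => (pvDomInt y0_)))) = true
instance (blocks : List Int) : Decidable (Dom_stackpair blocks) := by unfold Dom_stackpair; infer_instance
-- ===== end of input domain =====

-- B replaces A's index loop (with break and three branches) by a recursive peel that
-- pairs the first and last element and recurses on the middle slice sub[1:-1]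
-- (objective: alternative — element access is positional, not index arithmetic).

-- ===== PORT A =====
-- A's for-loop with break, as structural recursion on the loop index.
-- Indices i and j are always within range when read, so pyGetD's default is never used.
def stackpairGo (blocks : List Int) (i : Int) : List (Int × Int × Int × Int) :=
  let n : Int := blocks.length
  if h : i < n then
    let j := n - i - 1
    if i = j then
      let cube := PySem.List.pyGetD blocks i 0
      (i, i, cube, cube) :: stackpairGo blocks (i + 1)
    else if j > i then
      let left := PySem.List.pyGetD blocks i 0
      let right := PySem.List.pyGetD blocks j 0
      (i, j, min left right, max left right) :: stackpairGo blocks (i + 1)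
    else []
  else []
termination_by ((blocks.length : Int) - i).toNat
decreasing_by all_goals omega

def stackpair (blocks : List Int) : List (Int × Int × Int × Int) :=
  stackpairGo blocks 0

-- ===== PORT B =====
-- sub[1:-1]: the slice is the tail without its last element (cited by the port's
-- termination proof, so it stays above the port).
theorem slice_one_neg_one (xs : List Int) :
    PySem.List.slice xs (some 1) (some (-1)) = xs.tail.dropLast := by
  simp only [PySem.List.slice, PySem.List.clampIdx]
  rcases xs with _ | ⟨x, ys⟩
  · simp
  · simp only [List.length_cons]
    norm_num
    rw [if_neg (by omega : ¬ ((ys.length : Int) < 0))]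
    simp [List.dropLast_eq_take]

-- _peel from Source B: yield the (first,last) pair, recurse on sub[1:-1].
def peel (sub : List Int) (i : Int) : List (Int × Int × Int × Int) :=
  if sub.isEmpty then []
  else if sub.length = 1 then
    let c := PySem.List.pyGetD sub 0 0
    [(i, i, c, c)]
  else
    let first := PySem.List.pyGetD sub 0 0
    let last := PySem.List.pyGetD sub (-1) 0
    (i, i + sub.length - 1, min first last, max first last) ::
      peel (PySem.List.slice sub (some 1) (some (-1))) (i + 1)
termination_by sub.length
decreasing_by
  rename_i h1 _
  rw [slice_one_neg_one]
  simp only [List.isEmpty_iff] at h1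
  have : sub.length ≠ 0 := by simpa using h1
  simp only [List.length_dropLast, List.length_tail]
  omega

def stackpair_alt (blocks : List Int) : List (Int × Int × Int × Int) :=
  peel blocks 0

-- ===== PRECONDITION & SPEC =====
def Spec_stackpair (blocks : List Int) (out : List (Int × Int × Int × Int)) : Prop := out = stackpair_alt blocks
instance (blocks : List Int) (out : List (Int × Int × Int × Int)) : Decidable (Spec_stackpair blocks out) := by unfold Spec_stackpair; infer_instance

-- ===== CLAIM (what is proved, stated in full; the proofs are below) =====
def Claim_equal_stackpair : Prop := ∀ (blocks : List Int), Dom_stackpair blocks → Spec_stackpair blocks (stackpair blocks)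

-- ===== LEMMAS AND PROOFS =====

-- the common characterization: the pair list plus the (possibly empty) odd middle
def specList (sub : List Int) (i : Int) : List (Int × Int × Int × Int) :=
  (List.range (sub.length / 2)).map (fun (k : Nat) =>
    (i + (k : Int), i + (sub.length : Int) - 1 - (k : Int),
     min (sub.getD k 0) (sub.getD (sub.length - 1 - k) 0),
     max (sub.getD k 0) (sub.getD (sub.length - 1 - k) 0)))
  ++ (if sub.length % 2 = 1 then
        [(i + ((sub.length / 2 : Nat) : Int), i + ((sub.length / 2 : Nat) : Int),
          sub.getD (sub.length / 2) 0, sub.getD (sub.length / 2) 0)]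
      else [])

theorem mid_getD (sub : List Int) (k : Nat) (hk : k < sub.length - 2) :
    (sub.tail.dropLast).getD k 0 = sub.getD (k + 1) 0 := by
  have h1 : sub.tail.length = sub.length - 1 := List.length_tail ..
  simp only [List.getD_eq_getElem?_getD, List.getElem?_dropLast, h1,
    List.getElem?_tail]
  rw [if_pos (by omega)]

theorem peel_char (n : Nat) : ∀ (sub : List Int), sub.length = n → ∀ i : Int,
    peel sub i = specList sub i := by
  induction n using Nat.strong_induction_on with
  | _ n ih =>
    intro sub hlen i
    by_cases h0 : sub.isEmpty
    · rw [peel, if_pos h0]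
      simp only [List.isEmpty_iff] at h0
      simp [specList, h0]
    · by_cases h1 : sub.length = 1
      · rw [peel, if_neg h0, if_pos h1]
        have : PySem.List.pyGetD sub 0 0 = sub.getD 0 0 := by
          simpa using PySem.List.pyGetD_natCast sub 0 0
        simp [specList, h1, this, List.getD_eq_getElem?_getD]
      · -- general case: sub.length = m ≥ 2
        have hm : 2 ≤ sub.length := by
          simp only [List.isEmpty_iff] at h0
          have : sub.length ≠ 0 := by simpa using h0
          omega
        set m := sub.length with hmdef
        rw [peel, if_neg h0, if_neg h1, slice_one_neg_one]
        have hmidlen : (sub.tail.dropLast).length = m - 2 := by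
          rw [List.length_dropLast, List.length_tail]
          omega
        rw [ih (m - 2) (by omega) _ hmidlen (i + 1)]
        -- rewrite both sides via specList
        have hfirst : PySem.List.pyGetD sub 0 0 = sub.getD 0 0 := by
          simpa using PySem.List.pyGetD_natCast sub 0 0
        have hlast : PySem.List.pyGetD sub (-1) 0 = sub.getD (m - 1) 0 := by
          rw [show ((-1 : Int)) = -(1 : Nat) by norm_num,
            PySem.List.pyGetD_neg_natCast sub 1 0 (by omega) (by omega)]
          rw [List.getD_eq_getElem?_getD, List.getElem?_eq_getElem (by omega)]
          simp only [Option.getD_some]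
          rfl
        rw [hfirst, hlast]
        unfold specList
        rw [hmidlen]
        have hhalf : m / 2 = (m - 2) / 2 + 1 := by omega
        rw [hhalf, List.range_succ_eq_map, List.map_cons, List.map_map]
        have hmaps : ((List.range ((m - 2) / 2)).map (fun (k : Nat) =>
            ((i + 1) + (k : Int), (i + 1) + (((m : Nat) - 2 : Nat) : Int) - 1 - (k : Int),
             min ((sub.tail.dropLast).getD k 0) ((sub.tail.dropLast).getD ((m - 2) - 1 - k) 0),
             max ((sub.tail.dropLast).getD k 0) ((sub.tail.dropLast).getD ((m - 2) - 1 - k) 0))))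
            = ((List.range ((m - 2) / 2)).map ((fun (k : Nat) =>
            (i + (k : Int), i + ((m : Nat) : Int) - 1 - (k : Int),
             min (sub.getD k 0) (sub.getD (m - 1 - k) 0),
             max (sub.getD k 0) (sub.getD (m - 1 - k) 0))) ∘ Nat.succ)) := by
          refine List.map_congr_left ?_
          intro k hk
          rw [List.mem_range] at hk
          have e1 : (sub.tail.dropLast).getD k 0 = sub.getD (k + 1) 0 :=
            mid_getD sub k (by omega)
          have e2 : (sub.tail.dropLast).getD ((m - 2) - 1 - k) 0
              = sub.getD (m - 1 - (k + 1)) 0 := by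
            rw [mid_getD sub ((m - 2) - 1 - k) (by omega)]
            congr 1
            omega
          simp only [Function.comp_apply, Nat.succ_eq_add_one, e1, e2]
          have c1 : ((((m : Nat) - 2 : Nat)) : Int) = (m : Int) - 2 := by omega
          have c2 : ((k + 1 : Nat) : Int) = (k : Int) + 1 := by omega
          rw [c1, c2]
          simp only [Prod.mk.injEq, min_self, max_self, and_true, true_and, and_self]
          omega
        rw [hmaps, List.cons_append]
        have hmod : (m - 2) % 2 = m % 2 := by omega
        rw [hmod]
        refine List.cons_eq_cons.mpr ⟨?_, congrArg (_ ++ ·) ?_⟩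
        · -- head tuples agree
          simp only [Nat.cast_zero, Prod.mk.injEq, and_true, true_and, and_self]
          constructor
          · ring
          constructor
          · ring
          constructor <;> rfl
        · -- middles agree
          by_cases ho : m % 2 = 1
          · rw [if_pos ho, if_pos ho]
            have e3 : (sub.tail.dropLast).getD ((m - 2) / 2) 0 = sub.getD (m / 2) 0 := by
              rw [mid_getD sub ((m - 2) / 2) (by omega)]
              congr 1
              omega
            have c3 : (i + 1) + (((m - 2) / 2 : Nat) : Int) = i + ((m / 2 : Nat) : Int) := by
              omega
            rw [e3, c3, ← hhalf]
          · rw [if_neg ho, if_neg ho]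

-- ----- A-side characterization (loop with break) -----
def pairTup (blocks : List Int) (k : Nat) : Int × Int × Int × Int :=
  ((k : Int), (blocks.length : Int) - 1 - k,
   min (blocks.getD k 0) (blocks.getD (blocks.length - 1 - k) 0),
   max (blocks.getD k 0) (blocks.getD (blocks.length - 1 - k) 0))

def midList (blocks : List Int) : List (Int × Int × Int × Int) :=
  if blocks.length % 2 = 1 then
    [(((blocks.length / 2 : Nat) : Int), ((blocks.length / 2 : Nat) : Int),
      blocks.getD (blocks.length / 2) 0, blocks.getD (blocks.length / 2) 0)]
  else []

theorem go_base (blocks : List Int) :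
    stackpairGo blocks ((blocks.length / 2 : Nat) : Int) = midList blocks := by
  rcases Nat.eq_zero_or_pos blocks.length with h0 | hpos
  · rw [stackpairGo, midList]
    simp [h0]
  · by_cases ho : blocks.length % 2 = 1
    · rw [stackpairGo]
      rw [dif_pos (by omega), if_pos (by omega :
        ((blocks.length / 2 : Nat) : Int) = (blocks.length : Int) - ((blocks.length / 2 : Nat) : Int) - 1)]
      rw [stackpairGo]
      by_cases hl : blocks.length = 1
      · rw [dif_neg (by omega)]
        rw [midList, if_pos ho]
        simp only [PySem.List.pyGetD_natCast]
      · rw [dif_pos (by omega), if_neg (by omega), if_neg (by omega)]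
        rw [midList, if_pos ho]
        simp only [PySem.List.pyGetD_natCast]
    · rw [stackpairGo]
      rw [dif_pos (by omega), if_neg (by omega), if_neg (by omega)]
      rw [midList, if_neg ho]

theorem go_step (blocks : List Int) (k : Nat) (hk : k < blocks.length / 2) :
    stackpairGo blocks (k : Int) = pairTup blocks k :: stackpairGo blocks ((k : Int) + 1) := by
  have hn : (k : Int) < (blocks.length : Int) := by omega
  have hj : (blocks.length : Int) - (k : Int) - 1 = ((blocks.length - 1 - k : Nat) : Int) := by omega
  rw [stackpairGo]
  simp only [dif_pos hn, if_neg (show ¬ (k : Int) = (blocks.length : Int) - (k : Int) - 1 by omega),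
    if_pos (show (blocks.length : Int) - (k : Int) - 1 > (k : Int) by omega)]
  rw [hj]
  simp [pairTup]
  omega

theorem go_char (blocks : List Int) (d k : Nat) (h : k + d = blocks.length / 2) :
    stackpairGo blocks (k : Int) = (List.range' k d).map (pairTup blocks) ++ midList blocks := by
  induction d generalizing k with
  | zero =>
      simp only [Nat.add_zero] at h
      subst h
      simpa using go_base blocks
  | succ d ih =>
      rw [go_step blocks k (by omega), List.range'_succ, List.map_cons, List.cons_append]
      have : ((k : Int) + 1) = ((k + 1 : Nat) : Int) := by push_cast; ring
      rw [this, ih (k + 1) (by omega)]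

theorem a_char (blocks : List Int) :
    stackpair blocks = (List.range (blocks.length / 2)).map (pairTup blocks) ++ midList blocks := by
  have := go_char blocks (blocks.length / 2) 0 (by omega)
  simpa [stackpair, List.range_eq_range'] using this

theorem spec0 (blocks : List Int) :
    specList blocks 0 = (List.range (blocks.length / 2)).map (pairTup blocks) ++ midList blocks := by
  unfold specList midList
  congr 1
  · refine List.map_congr_left ?_
    intro k hk
    simp [pairTup]
  · by_cases ho : blocks.length % 2 = 1
    · rw [if_pos ho, if_pos ho]
      simp
    · rw [if_neg ho, if_neg ho]

-- ===== VERDICT (by name: the statement is the Claim_ definition above) =====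
theorem stackpair_spec : Claim_equal_stackpair := by
  intro blocks _
  unfold Spec_stackpair stackpair_alt
  rw [a_char, peel_char blocks.length blocks rfl 0, spec0]
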